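-- pv_equiv track=rewrite | github.com/jean-pasquier/advent-of-code-2022 | day_1/day_1.py | find_max_calories
-- ===== SOURCE A (Python) =====
-- from typing import Iterable
--
-- EMPTY_LINE = ""
--
-- def find_max_calories(raw_calories: Iterable[str]) -> int:
--     max_cal = 0
--     current_cal = 0
--
--     for raw_line in raw_calories:
--
--         line = raw_line.strip()
--
--         # inside current elf paragraph
--         if line != EMPTY_LINE:
--             current_cal += int(line)
--             continue
--
--         # otherwise marking as max if current is higher
--         if current_cal > max_cal:
--             max_cal = current_cal
--
--         # jumping to next paragraph
--         current_cal = 0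
--
--     # handle last elf
--     return max(current_cal, max_cal)
-- ===== SOURCE B (Python) =====
-- from itertools import groupby
--
--
-- def find_max_calories(raw_calories):
--     totals = [
--         sum(int(line.strip()) for line in run)
--         for is_blank, run in groupby(raw_calories, key=lambda l: l.strip() == "")
--         if not is_blank
--     ]
--     return max([0] + totals)
-- ===== Notes on version B (the rewrite author's own statement) =====
-- stated objective: alternative
-- what changed: Replaces the fused running-sum/running-max loop with a group-then-reduce shape: itertools.groupby splits the lines into blank/non-blank runs, each non-blank run is summed into a totals list, and the result is max([0] + totals).
import Mathlib
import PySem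

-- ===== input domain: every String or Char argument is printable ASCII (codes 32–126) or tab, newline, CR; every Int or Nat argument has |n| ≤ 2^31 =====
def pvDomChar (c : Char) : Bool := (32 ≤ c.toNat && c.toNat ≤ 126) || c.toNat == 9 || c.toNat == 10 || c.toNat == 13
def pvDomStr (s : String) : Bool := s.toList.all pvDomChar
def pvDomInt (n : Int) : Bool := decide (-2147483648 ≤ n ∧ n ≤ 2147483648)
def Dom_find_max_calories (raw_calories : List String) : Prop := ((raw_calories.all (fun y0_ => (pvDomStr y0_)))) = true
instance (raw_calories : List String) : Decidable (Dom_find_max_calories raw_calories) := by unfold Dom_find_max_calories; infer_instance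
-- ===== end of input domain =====

-- B replaces A's fused running-sum/running-max loop by a group-then-reduce shape
-- (split the lines into blank/non-blank runs, sum each non-blank run, take max with a 0 floor).


-- ===== PORT A =====
def find_max_calories (raw_calories : List String) : Int :=
  let st := raw_calories.foldl
    (fun (p : Int × Int) raw_line =>
      let line := PySem.Str.strip raw_line
      if line ≠ "" then
        (p.1, p.2 + (PySem.Int.ofStr? line).getD 0)   -- int(line); Pre_ excludes the ValueError inputs
      else
        (if p.2 > p.1 then p.2 else p.1, 0))
    ((0 : Int), (0 : Int))
  max st.2 st.1

-- ===== PORT B =====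
def pvBlank (l : String) : Bool := PySem.Str.strip l == ""

-- itertools.groupby: maximal runs of lines with the same key (line.strip() == "")
def pvGroups : List String → List (List String)
  | [] => []
  | l :: ls =>
    ((l :: ls).takeWhile (fun x => pvBlank x == pvBlank l)) ::
      pvGroups ((l :: ls).dropWhile (fun x => pvBlank x == pvBlank l))
termination_by ls => ls.length
decreasing_by
  simp only [List.dropWhile_cons, pvBlank, beq_self_eq_true, if_true]
  exact Nat.lt_succ_of_le (List.length_dropWhile_le _ _)

def pvTotal (g : List String) : Int :=
  g.foldl (fun s line => s + (PySem.Int.ofStr? (PySem.Str.strip line)).getD 0) 0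

def find_max_calories_alt (raw_calories : List String) : Int :=
  let totals := (pvGroups raw_calories).filterMap (fun run =>
    match run with
    | [] => none
    | x :: _ => if pvBlank x then none else some (pvTotal run))
  (PySem.List.max? ((0 : Int) :: totals) (fun y => y)).getD 0

-- ===== PRECONDITION & SPEC =====
-- Pre_ excludes exactly the inputs where Python A raises ValueError: a non-blank
-- stripped line that is not a valid int literal.
def Pre_find_max_calories (raw_calories : List String) : Prop :=
  ∀ l ∈ raw_calories, PySem.Str.strip l ≠ "" →
    (PySem.Int.ofStr? (PySem.Str.strip l)).isSome = true
instance (raw_calories : List String) : Decidable (Pre_find_max_calories raw_calories) := by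
  unfold Pre_find_max_calories; infer_instance

def pvWitness_find_max_calories : List String := ["1", " 2 ", "", "3"]

def Spec_find_max_calories (raw_calories : List String) (out : Int) : Prop := out = find_max_calories_alt raw_calories
instance (raw_calories : List String) (out : Int) : Decidable (Spec_find_max_calories raw_calories out) := by unfold Spec_find_max_calories; infer_instance

-- ===== CLAIM (what is proved, stated in full; the proofs are below) =====
def Claim_equal_find_max_calories : Prop := ∀ (raw_calories : List String), Dom_find_max_calories raw_calories → Pre_find_max_calories raw_calories → Spec_find_max_calories raw_calories (find_max_calories raw_calories)

-- ===== LEMMAS AND PROOFS =====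

-- reference: max over 0 and all group totals, with c the pending partial sum
def pvV : List String → Int → Int
  | [], c => max 0 c
  | l :: ls, c =>
    if pvBlank l then max c (pvV ls 0)
    else pvV ls (c + (PySem.Int.ofStr? (PySem.Str.strip l)).getD 0)

theorem pvV_nonneg : ∀ (ls : List String) (c : Int), 0 ≤ pvV ls c := by
  intro ls
  induction ls with
  | nil => intro c; simp [pvV]
  | cons l t ih =>
    intro c
    simp only [pvV]
    split
    · exact le_trans (ih 0) (le_max_right _ _)
    · exact ih _

-- A's loop computes max m (pvV ls c) for any state with 0 ≤ m
theorem pvA_eq_V : ∀ (ls : List String) (m c : Int), 0 ≤ m →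
    max (ls.foldl
      (fun (p : Int × Int) raw_line =>
        if PySem.Str.strip raw_line ≠ "" then (p.1, p.2 + (PySem.Int.ofStr? (PySem.Str.strip raw_line)).getD 0)
        else (if p.2 > p.1 then p.2 else p.1, 0)) (m, c)).2
      (ls.foldl
      (fun (p : Int × Int) raw_line =>
        if PySem.Str.strip raw_line ≠ "" then (p.1, p.2 + (PySem.Int.ofStr? (PySem.Str.strip raw_line)).getD 0)
        else (if p.2 > p.1 then p.2 else p.1, 0)) (m, c)).1 = max m (pvV ls c) := by
  intro ls
  induction ls with
  | nil => intro m c hm; simp only [List.foldl_nil, pvV]; omega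
  | cons l t ih =>
    intro m c hm
    by_cases h : PySem.Str.strip l = ""
    · have hb : pvBlank l = true := by simp [pvBlank, h]
      simp only [List.foldl_cons, h, pvV, hb, ne_eq, not_true_eq_false, if_false, if_true]
      have h2 := ih (if c > m then c else m) 0 (by split <;> omega)
      simp only at h2
      rw [h2]
      split <;> omega
    · have hb : pvBlank l = false := by simp [pvBlank, h]
      simp only [List.foldl_cons, pvV, hb, ne_eq, h, not_false_eq_true, if_true, if_false,
        Bool.false_eq_true]
      exact ih m _ hm

theorem pvV_blank_head : ∀ (rest : List String) (c : Int),
    (∀ r rs, rest = r :: rs → pvBlank r = true) → pvV rest c = max c (pvV rest 0) := by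
  intro rest c h
  cases rest with
  | nil => simp [pvV]; omega
  | cons r rs =>
    have hb := h r rs rfl
    have := pvV_nonneg rs 0
    simp only [pvV, hb, if_true]
    omega

theorem pvV_nonblank_run : ∀ (run rest : List String) (c : Int),
    (∀ x ∈ run, pvBlank x = false) →
    pvV (run ++ rest) c = pvV rest (c + pvTotal run) := by
  intro run
  induction run with
  | nil => intro rest c _; simp [pvTotal]
  | cons x t ih =>
    intro rest c h
    have hx : pvBlank x = false := h x (by simp)
    simp only [List.cons_append, pvV, hx, Bool.false_eq_true, if_false]
    rw [ih rest _ (fun y hy => h y (by simp [hy]))]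
    congr 1
    simp only [pvTotal, List.foldl_cons, PySem.List.foldl_add]
    ring

theorem pvV_blank_run : ∀ (run rest : List String) (c : Int),
    run ≠ [] → (∀ x ∈ run, pvBlank x = true) →
    pvV (run ++ rest) c = max c (pvV rest 0) := by
  intro run
  induction run with
  | nil => intro rest c h; exact absurd rfl h
  | cons x t ih =>
    intro rest c _ h
    have hx : pvBlank x = true := h x (by simp)
    simp only [List.cons_append, pvV, hx, if_true]
    cases t with
    | nil => simp
    | cons y u =>
      rw [ih rest 0 (by simp) (fun z hz => h z (by simp [hz]))]
      have := pvV_nonneg rest 0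
      omega

theorem pvFoldMax : ∀ (l : List Int) (a b : Int),
    l.foldl max (max a b) = max a (l.foldl max b) := by
  intro l
  induction l with
  | nil => intro a b; rfl
  | cons x t ih =>
    intro a b
    simp only [List.foldl_cons, max_assoc, ih]

theorem pvB_eq_V : ∀ (ls : List String),
    ((pvGroups ls).filterMap (fun run =>
      match run with
      | [] => none
      | x :: _ => if pvBlank x then none else some (pvTotal run))).foldl max 0 = pvV ls 0 := by
  intro ls
  induction ls using pvGroups.induct with
  | case1 => simp [pvGroups, pvV]
  | case2 l t ih =>
    rw [pvGroups]
    have hsplit : (l :: t).takeWhile (fun x => pvBlank x == pvBlank l) ++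
        (l :: t).dropWhile (fun x => pvBlank x == pvBlank l) = l :: t :=
      List.takeWhile_append_dropWhile
    have hrun : (l :: t).takeWhile (fun x => pvBlank x == pvBlank l) =
        l :: t.takeWhile (fun x => pvBlank x == pvBlank l) := by
      simp [List.takeWhile]
    have hmem : ∀ x ∈ (l :: t).takeWhile (fun x => pvBlank x == pvBlank l),
        pvBlank x = pvBlank l := by
      intro x hx
      simpa using List.mem_takeWhile_imp hx
    have hrest : ∀ r rs, (l :: t).dropWhile (fun x => pvBlank x == pvBlank l) = r :: rs →
        pvBlank r = (!pvBlank l) := by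
      intro r rs hr
      have := List.head_dropWhile_not (fun x => pvBlank x == pvBlank l) (l := l :: t)
        (by simp [hr])
      simp only [hr, List.head_cons, beq_eq_false_iff_ne, ne_eq] at this
      cases hl : pvBlank l <;> cases hrv : pvBlank r <;> simp_all
    by_cases hb : pvBlank l = true
    · -- blank run: contributes no total
      simp only [hb] at ih hsplit hrun hmem hrest ⊢
      rw [hrun]
      simp only [List.filterMap_cons, hb, if_true]
      rw [ih]
      conv_rhs => rw [← hsplit]
      rw [pvV_blank_run _ _ 0 (by rw [hrun]; simp) (by intro x hx; rw [hmem x hx])]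
      have := pvV_nonneg ((l :: t).dropWhile (fun x => pvBlank x == true)) 0
      omega
    · -- non-blank run: contributes its total
      have hb' : pvBlank l = false := by simpa using hb
      simp only [hb'] at ih hsplit hrun hmem hrest ⊢
      rw [hrun]
      simp only [List.filterMap_cons, hb', Bool.false_eq_true, if_false, List.foldl_cons]
      rw [← hrun]
      rw [max_comm (0:Int) (pvTotal ((l :: t).takeWhile (fun x => pvBlank x == false)))]
      rw [pvFoldMax, ih]
      conv_rhs => rw [← hsplit]
      rw [pvV_nonblank_run _ _ 0 (by intro x hx; rw [hmem x hx])]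
      simp only [zero_add]
      have hbh := pvV_blank_head ((l :: t).dropWhile (fun x => pvBlank x == false))
        (pvTotal ((l :: t).takeWhile (fun x => pvBlank x == false)))
        (by intro r rs hr; rw [hrest r rs hr]; rfl)
      conv_rhs => rw [hbh]

-- ===== VERDICT (by name: the statement is the Claim_ definition above) =====
theorem find_max_calories_spec : Claim_equal_find_max_calories := by
  intro raw _ _
  show find_max_calories raw = find_max_calories_alt raw
  unfold find_max_calories find_max_calories_alt
  simp only [PySem.List.max?_id_cons, Option.getD_some, pvB_eq_V]
  rw [pvA_eq_V raw 0 0 le_rfl]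
  have := pvV_nonneg raw 0
  omega
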